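-- pv_equiv track=rewrite | github.com/Raminpahnabi/StokesFlow | HWs/HW8/HW8__Ans/Fenwick_Josh_jjf67_MultiDimensionalBasisFunctions.py | GlobalToLocalIdxs
-- ===== SOURCE A (Python) =====
-- def GlobalToLocalIdxs(A,degs):
--     idxs = []
--     for i in range(len(degs)):
--         if i == 0:
--             idx = A % (degs[i] + 1)
--         else:
--             denominator = 1
--             for j in range(i):
--                 denominator *= (degs[j] + 1)
--             idx = A // denominator
--         idxs.append(idx)
--     return idxs
-- ===== SOURCE B (Python) =====
-- def GlobalToLocalIdxs(A, degs):
--     # One pass with a running prefix product (A recomputes each denominator from scratch).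
--     if not degs:
--         return []
--     idxs = [A % (degs[0] + 1)]
--     p = 1
--     for d in degs[:-1]:
--         p *= d + 1
--         idxs.append(A // p)
--     return idxs
-- ===== Notes on version B (the rewrite author's own statement) =====
-- stated objective: faster
-- what changed: B keeps a running prefix product updated once per iteration instead of A's inner loop that recomputes the whole denominator product for every index.
import Mathlib
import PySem

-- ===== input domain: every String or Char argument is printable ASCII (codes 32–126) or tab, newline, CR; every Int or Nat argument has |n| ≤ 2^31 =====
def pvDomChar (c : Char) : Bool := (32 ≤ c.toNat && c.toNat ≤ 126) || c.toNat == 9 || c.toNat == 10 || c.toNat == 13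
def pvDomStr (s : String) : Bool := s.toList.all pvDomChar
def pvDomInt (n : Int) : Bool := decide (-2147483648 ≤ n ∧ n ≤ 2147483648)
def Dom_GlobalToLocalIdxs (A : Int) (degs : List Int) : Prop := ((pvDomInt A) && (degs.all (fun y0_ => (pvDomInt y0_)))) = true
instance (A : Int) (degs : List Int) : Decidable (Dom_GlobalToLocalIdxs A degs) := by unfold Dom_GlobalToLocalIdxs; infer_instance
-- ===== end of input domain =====

-- B replaces A's inner denominator loop by a running prefix product: O(n) instead of O(n^2) multiplications.

-- ===== PORT A =====
def GlobalToLocalIdxs (A : Int) (degs : List Int) : List Int :=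
  (PySem.List.pyRange 0 (degs.length : Int) 1).foldl
    (fun idxs i =>
      if i = 0 then
        idxs ++ [PySem.Int.mod A (PySem.List.pyGetD degs i 0 + 1)]
      else
        let denominator :=
          (PySem.List.pyRange 0 i 1).foldl
            (fun d j => d * (PySem.List.pyGetD degs j 0 + 1)) 1
        idxs ++ [PySem.Int.floordiv A denominator])
    []

-- ===== PORT B =====
-- the 'for d in degs[:-1]' loop of Source B: one new element per iteration, running product q
def pvAltLoop (A : Int) (p : Int) : List Int → List Int
  | [] => []
  | d :: rest =>
    let q := p * (d + 1)
    PySem.Int.floordiv A q :: pvAltLoop A q rest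

def GlobalToLocalIdxs_alt (A : Int) (degs : List Int) : List Int :=
  match degs with
  | [] => []
  | d0 :: _ =>
    PySem.Int.mod A (d0 + 1) :: pvAltLoop A 1 (PySem.List.slice degs none (some (-1)))

-- ===== PRECONDITION & SPEC =====
-- Pre_ excludes exactly the inputs where Python A raises ZeroDivisionError:
-- degs starting with -1 (modulus 0) or containing -1 before the last position (denominator 0).
def Pre_GlobalToLocalIdxs (A : Int) (degs : List Int) : Prop :=
  degs.head? ≠ some (-1) ∧ ∀ d ∈ degs.dropLast, d ≠ (-1 : Int)
instance (A : Int) (degs : List Int) : Decidable (Pre_GlobalToLocalIdxs A degs) := by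
  unfold Pre_GlobalToLocalIdxs; infer_instance

def pvWitness_GlobalToLocalIdxs : Int × List Int := (5, [2, 3])

def Spec_GlobalToLocalIdxs (A : Int) (degs : List Int) (out : List Int) : Prop := out = GlobalToLocalIdxs_alt A degs
instance (A : Int) (degs : List Int) (out : List Int) : Decidable (Spec_GlobalToLocalIdxs A degs out) := by unfold Spec_GlobalToLocalIdxs; infer_instance

-- ===== CLAIM (what is proved, stated in full; the proofs are below) =====
def Claim_equal_GlobalToLocalIdxs : Prop := ∀ (A : Int) (degs : List Int), Dom_GlobalToLocalIdxs A degs → Pre_GlobalToLocalIdxs A degs → Spec_GlobalToLocalIdxs A degs (GlobalToLocalIdxs A degs)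

-- ===== LEMMAS AND PROOFS =====

-- B's loop, in closed form: k-th element divides A by p times the prefix product of (·+1).
theorem pvAltLoop_eq (A : Int) (ys : List Int) (p : Int) :
    pvAltLoop A p ys = (List.range ys.length).map
      (fun k => PySem.Int.floordiv A (p * (((ys.take (k + 1)).map (· + 1)).prod))) := by
  induction ys generalizing p with
  | nil => simp [pvAltLoop]
  | cons d rest ih =>
    simp only [pvAltLoop, List.length_cons, List.range_succ_eq_map, List.map_cons,
      List.map_map, ih]
    congr 1
    · simp
    · apply List.map_congr_left
      intro k _
      simp [mul_assoc]

-- A's inner loop (the denominator) equals the prefix product of (·+1) over the first k entries.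
theorem pvDenom_eq (degs : List Int) (k : Nat) (hk : k ≤ degs.length) :
    (List.range k).foldl (fun d j => d * (degs.getD j 0 + 1)) 1
      = ((degs.take k).map (· + 1)).prod := by
  induction k with
  | zero => simp
  | succ k ih =>
    rw [List.range_succ, List.foldl_append, ih (by omega)]
    have hlt : k < degs.length := by omega
    have h2 : k < (degs.map (fun x => x + 1)).length := by simpa using hlt
    simp only [List.foldl_cons, List.foldl_nil, List.getD, List.getElem?_eq_getElem hlt,
      Option.getD_some, List.map_take]
    rw [List.prod_take_succ _ k h2]
    simp

theorem pv_main (A : Int) (degs : List Int) :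
    GlobalToLocalIdxs A degs = GlobalToLocalIdxs_alt A degs := by
  cases degs with
  | nil => rfl
  | cons d0 rest =>
    have hrhs : GlobalToLocalIdxs_alt A (d0 :: rest)
        = PySem.Int.mod A (d0 + 1) :: pvAltLoop A 1 ((d0 :: rest).dropLast) := by
      simp [GlobalToLocalIdxs_alt, PySem.List.slice_to_neg_one]
    rw [hrhs, pvAltLoop_eq]
    unfold GlobalToLocalIdxs
    -- turn A's foldl-append into a map
    have hbody : (fun (idxs : List Int) (i : Int) =>
        if i = 0 then
          idxs ++ [PySem.Int.mod A (PySem.List.pyGetD (d0 :: rest) i 0 + 1)]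
        else
          idxs ++ [PySem.Int.floordiv A
            ((PySem.List.pyRange 0 i 1).foldl
              (fun d j => d * (PySem.List.pyGetD (d0 :: rest) j 0 + 1)) 1)])
      = (fun idxs i => idxs ++ [(fun i =>
          if i = 0 then PySem.Int.mod A (PySem.List.pyGetD (d0 :: rest) i 0 + 1)
          else PySem.Int.floordiv A
            ((PySem.List.pyRange 0 i 1).foldl
              (fun d j => d * (PySem.List.pyGetD (d0 :: rest) j 0 + 1)) 1)) i]) := by
      funext idxs i
      by_cases h : i = 0 <;> simp [h]
    rw [hbody, PySem.List.foldl_append_singleton_eq_map, PySem.List.pyRange_zero_natCast,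
      List.map_map]
    have hlen : (d0 :: rest).length = rest.length + 1 := rfl
    rw [hlen, List.range_succ_eq_map, List.map_cons, List.map_map]
    have hdl : (d0 :: rest).dropLast.length = rest.length := by simp
    rw [hdl]
    simp only [List.nil_append]
    congr 1
    · simp
    · apply List.map_congr_left
      intro k hk
      have hk' : k < rest.length := List.mem_range.mp hk
      have hcast : ((Nat.succ k : Nat) : Int) ≠ 0 := by
        simp [Nat.succ_eq_add_one]; omega
      simp only [Function.comp]
      rw [if_neg (by exact_mod_cast hcast)]
      rw [PySem.List.pyRange_zero_natCast]
      rw [List.foldl_map]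
      have hfun : (fun (d : Int) (j : Nat) => d * (PySem.List.pyGetD (d0 :: rest) (j : Int) 0 + 1))
          = (fun (d : Int) (j : Nat) => d * ((d0 :: rest).getD j 0 + 1)) := by
        funext d j
        rw [PySem.List.pyGetD_natCast]
      rw [hfun, pvDenom_eq (d0 :: rest) (k + 1) (by simp; omega)]
      have htake : ((d0 :: rest).dropLast).take (k + 1) = (d0 :: rest).take (k + 1) := by
        rw [List.dropLast_eq_take, List.take_take]
        congr 1
        simp [hlen]; omega
      rw [htake, one_mul]

-- ===== VERDICT (by name: the statement is the Claim_ definition above) =====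
theorem GlobalToLocalIdxs_spec : Claim_equal_GlobalToLocalIdxs := by
  intro A degs _ _
  unfold Spec_GlobalToLocalIdxs
  exact pv_main A degs
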